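-- pv_equiv track=rewrite | github.com/Aasthaengg/IBMdataset | Python_codes/p03089/s205045664.py | solve
-- ===== SOURCE A (Python) =====
-- def solve(arr):
--   ret = []
--   while len(arr) > 0:
--     before = len(arr)
--     for i in reversed(range(len(arr))):
--       if arr[i] == i + 1:
--         ret.append(arr.pop(i))
--         break
--     if len(arr) == before:
--       return None
--   return list(reversed(ret))
-- ===== SOURCE B (Python) =====
-- def solve(arr):
--     # Alternative algorithm: instead of repeatedly scanning and popping from a
--     # shrinking list, work over the fixed original array with liveness flags and
--     # countdown counters rem[q] = (current 1-based rank of q) - arr[q]; a removal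
--     # just clears a flag and decrements the counters of the suffix.
--     # (Note: the original mutates its argument via pop; this version does not.)
--     n = len(arr)
--     rem = [i + 1 - v for i, v in enumerate(arr)]
--     alive = [True] * n
--     order = []
--     for _ in range(n):
--         p = None
--         for q in range(n):
--             if alive[q] and rem[q] == 0:
--                 p = q
--         if p is None:
--             return None
--         alive[p] = False
--         order.append(arr[p])
--         for q in range(p + 1, n):
--             rem[q] -= 1
--     order.reverse()
--     return order
-- ===== Notes on version B (the rewrite author's own statement) =====
-- stated objective: alternative
-- what changed: Replaces the pop-and-rescan simulation on a shrinking list by a marking algorithm over the fixed original array: liveness flags plus countdown counters rem[q] = rank(q) - arr[q], where a removal clears one flag and decrements the suffix counters; no list is ever mutated structurally. A also empties its argument list in place (pop); B leaves it untouched - the equivalence is about the return value.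
import Mathlib
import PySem

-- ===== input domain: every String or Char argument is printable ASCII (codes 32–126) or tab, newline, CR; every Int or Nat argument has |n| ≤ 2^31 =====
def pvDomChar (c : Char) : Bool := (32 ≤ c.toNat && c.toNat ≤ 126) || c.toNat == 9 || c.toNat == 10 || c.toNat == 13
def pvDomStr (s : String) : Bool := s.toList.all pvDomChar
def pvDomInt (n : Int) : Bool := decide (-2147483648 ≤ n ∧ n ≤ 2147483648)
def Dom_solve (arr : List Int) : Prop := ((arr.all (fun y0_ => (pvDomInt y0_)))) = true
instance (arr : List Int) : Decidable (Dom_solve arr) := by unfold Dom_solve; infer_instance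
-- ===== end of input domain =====

-- B replaces A's pop-and-rescan on a shrinking list by flags + countdown counters over
-- the fixed array (alternative algorithm, same O(n^2)); A also empties its argument list
-- in place via pop — the equivalence proved here is about the return value only.


-- ===== PORT A =====
-- 'for i in reversed(range(len(arr))): if arr[i] == i + 1: … break'
-- scans i = n-1, n-2, …, 0 and returns the first (= greatest) i with arr[i] == i+1
def findFixA (arr : List Int) : Nat → Option Nat
  | 0 => none
  | i + 1 => if arr.getD i 0 = (i : Int) + 1 then some i else findFixA arr i

-- the 'while len(arr) > 0' loop; each iteration pops exactly one element, so
-- fuel = len(arr) bounds the number of iterations (the fuel-0 guard is unreachable)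
def loopA : Nat → List Int → List Int → Option (List Int)
  | _, [], ret => some ret.reverse
  | 0, _ :: _, _ => none
  | fuel + 1, a :: arr', ret =>
    match findFixA (a :: arr') (a :: arr').length with
    | none => none
    | some i =>
        loopA fuel ((a :: arr').take i ++ (a :: arr').drop (i + 1))
          (ret ++ [(a :: arr').getD i 0])

def solve (arr : List Int) : Option (List Int) := loopA arr.length arr []

-- ===== PORT B =====
-- 'for q in range(n): if alive[q] and rem[q] == 0: p = q'  (keeps the LAST hit)
def scanB (rem : List Int) (alive : List Bool) (n : Nat) : Option Nat :=
  (List.range n).foldl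
    (fun p q => if alive.getD q false && (rem.getD q 0 == 0) then some q else p) none

-- 'for q in range(p + 1, n): rem[q] -= 1'
def decSuffix (rem : List Int) (p : Nat) : List Int :=
  rem.take (p + 1) ++ (rem.drop (p + 1)).map (· - 1)

-- 'for _ in range(n): …'
def loopB (arr : List Int) : Nat → List Int → List Bool → List Int → Option (List Int)
  | 0, _, _, order => some order.reverse
  | k + 1, rem, alive, order =>
    match scanB rem alive arr.length with
    | none => none
    | some p => loopB arr k (decSuffix rem p) (alive.set p false) (order ++ [arr.getD p 0])

def solve_alt (arr : List Int) : Option (List Int) :=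
  loopB arr arr.length
    ((PySem.List.enumerate arr 0).map (fun iv => iv.1 + 1 - iv.2))
    (List.replicate arr.length true) []

-- ===== PRECONDITION & SPEC =====
def Spec_solve (arr : List Int) (out : Option (List Int)) : Prop := out = solve_alt arr
instance (arr : List Int) (out : Option (List Int)) : Decidable (Spec_solve arr out) := by unfold Spec_solve; infer_instance

-- ===== CLAIM (what is proved, stated in full; the proofs are below) =====
def Claim_equal_solve : Prop := ∀ (arr : List Int), Dom_solve arr → Spec_solve arr (solve arr)

-- ===== LEMMAS AND PROOFS =====

-- the sublist of arr at the still-alive positions (A's current working list)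
def compactL : List Int → List Bool → List Int
  | [], _ => []
  | _ :: _, [] => []
  | v :: vs, b :: bs => if b then v :: compactL vs bs else compactL vs bs

-- the counters B maintains, as a function of (arr, alive); c = 1 + #alive before here
def remOf : List Int → List Bool → Int → List Int
  | [], _, _ => []
  | _ :: _, [], _ => []
  | v :: vs, b :: bs, c => (c - v) :: remOf vs bs (if b then c + 1 else c)

theorem length_compactL : ∀ (arr : List Int) (alive : List Bool),
    arr.length = alive.length → (compactL arr alive).length = alive.count true := by
  intro arr
  induction arr with
  | nil =>
    intro alive h
    have : alive = [] := List.eq_nil_of_length_eq_zero (by simpa using h.symm)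
    subst this; simp [compactL]
  | cons v vs ih =>
    intro alive h
    cases alive with
    | nil => simp at h
    | cons b bs =>
      cases b <;> simp [compactL, List.count_cons, ih bs (by simpa using h)]


theorem compactL_replicate : ∀ (arr : List Int),
    compactL arr (List.replicate arr.length true) = arr := by
  intro arr
  induction arr with
  | nil => simp [compactL]
  | cons v vs ih => simp [compactL, List.replicate_succ, ih]


theorem remOf_replicate : ∀ (arr : List Int) (c : Int),
    (PySem.List.enumerate arr c).map (fun iv => iv.1 + 1 - iv.2)
      = remOf arr (List.replicate arr.length true) (c + 1) := by
  intro arr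
  induction arr with
  | nil => intro c; simp [remOf, PySem.List.enumerate]
  | cons v vs ih =>
    intro c
    simp only [List.length_cons, List.replicate_succ, PySem.List.enumerate_cons, List.map_cons,
      remOf]
    simp [ih (c + 1)]


theorem remOf_map : ∀ (arr : List Int) (alive : List Bool) (c : Int),
    remOf arr alive c = (remOf arr alive (c + 1)).map (· - 1) := by
  intro arr
  induction arr with
  | nil => intro alive c; simp [remOf]
  | cons v vs ih =>
    intro alive c
    cases alive with
    | nil => simp [remOf]
    | cons b bs =>
      simp only [remOf, List.map_cons]
      refine List.cons_eq_cons.mpr ⟨by ring, ?_⟩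
      cases b
      · simpa using ih bs c
      · simpa using ih bs (c + 1)


theorem length_remOf : ∀ (arr : List Int) (alive : List Bool) (c : Int),
    arr.length = alive.length → (remOf arr alive c).length = arr.length := by
  intro arr
  induction arr with
  | nil => intro alive c h; simp [remOf]
  | cons v vs ih =>
    intro alive c h
    cases alive with
    | nil => simp at h
    | cons b bs =>
      simp [remOf, ih bs (if b = true then c + 1 else c) (by simpa using h)]


theorem compactL_append : ∀ (arr : List Int) (alive : List Bool) (v : Int) (b : Bool),
    arr.length = alive.length →
    compactL (arr ++ [v]) (alive ++ [b]) = compactL arr alive ++ (if b then [v] else []) := by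
  intro arr
  induction arr with
  | nil =>
    intro alive v b h
    have : alive = [] := List.eq_nil_of_length_eq_zero (by simpa using h.symm)
    subst this
    cases b <;> simp [compactL]
  | cons x xs ih =>
    intro alive v b h
    cases alive with
    | nil => simp at h
    | cons c cs =>
      cases c <;> simp [compactL, ih cs v b (by simpa using h)]


theorem remOf_append : ∀ (arr : List Int) (alive : List Bool) (v : Int) (b : Bool) (c : Int),
    arr.length = alive.length →
    remOf (arr ++ [v]) (alive ++ [b]) c = remOf arr alive c ++ [c + (alive.count true : Int) - v] := by
  intro arr
  induction arr with
  | nil =>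
    intro alive v b c h
    have : alive = [] := List.eq_nil_of_length_eq_zero (by simpa using h.symm)
    subst this; simp [remOf]
  | cons x xs ih =>
    intro alive v b c h
    cases alive with
    | nil => simp at h
    | cons a as =>
      simp only [List.cons_append, remOf, List.count_cons]
      rw [ih as v b _ (by simpa using h)]
      cases a <;> simp <;> ring_nf


-- one unrolling of B's scan
theorem scanB_succ (rem : List Int) (alive : List Bool) (n : Nat) :
    scanB rem alive (n + 1)
      = if alive.getD n false && (rem.getD n 0 == 0) then some n else scanB rem alive n := by
  simp [scanB, List.range_succ]


theorem scanB_append (rem : List Int) (alive : List Bool) (r2 : List Int) (a2 : List Bool)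
    (n : Nat) (h1 : n ≤ rem.length) (h2 : n ≤ alive.length) :
    scanB (rem ++ r2) (alive ++ a2) n = scanB rem alive n := by
  induction n with
  | zero => simp [scanB]
  | succ m ih =>
    rw [scanB_succ, scanB_succ]
    rw [List.getD_append _ _ _ _ (by omega), List.getD_append _ _ _ _ (by omega),
      ih (by omega) (by omega)]


theorem findFixA_append : ∀ (m : Nat) (xs ys : List Int), m ≤ xs.length →
    findFixA (xs ++ ys) m = findFixA xs m := by
  intro m
  induction m with
  | zero => intro xs ys h; simp [findFixA]
  | succ k ih =>
    intro xs ys h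
    simp only [findFixA]
    rw [List.getD_append _ _ _ _ (by omega), ih xs ys (by omega)]


-- correspondence of one scan: B finds the greatest alive q with rem[q]=0 iff A finds the
-- greatest fixed point of the compacted list, and they are related by the alive-rank
def ScanRel (arr : List Int) (alive : List Bool) : Option Nat → Option Nat → Prop
  | none, none => True
  | some p, some i =>
      p < alive.length ∧ alive.getD p false = true ∧ i = (alive.take p).count true
  | _, _ => False

theorem ScanRel_extend (as : List Int) (bs : List Bool) (v : Int) (b : Bool)
    (o1 o2 : Option Nat) (hr : ScanRel as bs o1 o2) : ScanRel (as ++ [v]) (bs ++ [b]) o1 o2 := by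
  cases o1 with
  | none => cases o2 with
    | none => trivial
    | some i => exact absurd hr (by simp [ScanRel])
  | some p => cases o2 with
    | none => exact absurd hr (by simp [ScanRel])
    | some i =>
      obtain ⟨h1, h2, h3⟩ := hr
      refine ⟨by simp; omega, ?_, ?_⟩
      · rw [List.getD_append _ _ _ _ h1]; exact h2
      · rw [List.take_append_of_le_length (le_of_lt h1)]; exact h3

theorem scan_correspond : ∀ (arr : List Int) (alive : List Bool),
    arr.length = alive.length →
    ScanRel arr alive (scanB (remOf arr alive 1) alive arr.length)
      (findFixA (compactL arr alive) (compactL arr alive).length) := by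
  intro arr alive
  induction alive using List.reverseRecOn generalizing arr with
  | nil =>
    intro h
    have : arr = [] := List.eq_nil_of_length_eq_zero (by simpa using h)
    subst this
    exact trivial
  | append_singleton bs b ih =>
    intro h
    have hne : arr ≠ [] := by intro e; subst e; simp at h
    obtain ⟨as, v, rfl⟩ : ∃ as v, arr = as ++ [v] :=
      ⟨arr.dropLast, arr.getLast hne, (List.dropLast_append_getLast hne).symm⟩
    have hlen : as.length = bs.length := by simpa using h
    have hrl : (remOf as bs 1).length = as.length := length_remOf as bs 1 hlen
    have hcl : (compactL as bs).length = bs.count true := length_compactL as bs hlen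
    rw [remOf_append as bs v b 1 hlen, compactL_append as bs v b hlen]
    have hn : (as ++ [v]).length = as.length + 1 := by simp
    rw [hn, scanB_succ]
    have hga : (bs ++ [b]).getD as.length false = b := by
      rw [hlen, List.getD_append_right _ _ _ _ (le_refl _)]; simp
    have hgr : ((remOf as bs 1) ++ [1 + (bs.count true : Int) - v]).getD as.length 0
        = 1 + (bs.count true : Int) - v := by
      rw [← hrl, List.getD_append_right _ _ _ _ (le_refl _)]; simp
    rw [hga, hgr]
    cases b with
    | false =>
      simp only [Bool.false_eq_true, Bool.false_and, if_false, if_true, List.append_nil]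
      rw [scanB_append _ _ _ _ _ (by omega) (by omega)]
      exact ScanRel_extend as bs v false _ _ (ih as hlen)
    | true =>
      simp only [Bool.true_and, if_true]
      have hlc : (compactL as bs ++ [v]).length = bs.count true + 1 := by simp [hcl]
      rw [hlc]
      simp only [findFixA]
      have hgv : (compactL as bs ++ [v]).getD (bs.count true) 0 = v := by
        rw [← hcl, List.getD_append_right _ _ _ _ (le_refl _)]; simp
      rw [hgv]
      by_cases hv : v = (bs.count true : Int) + 1
      · have hb : (1 + (bs.count true : Int) - v == 0) = true := beq_iff_eq.mpr (by omega)
        rw [hb, if_pos rfl, if_pos hv]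
        refine ⟨by simp; omega, ?_, ?_⟩
        · rw [hlen, List.getD_append_right _ _ _ _ (le_refl _)]; simp
        · rw [hlen, List.take_append_of_le_length (le_refl _)]
          simp
      · have hb : (1 + (bs.count true : Int) - v == 0) = false := by
          rw [beq_eq_false_iff_ne]; omega
        rw [hb, if_neg (by simp), if_neg hv]
        rw [scanB_append _ _ _ _ _ (by omega) (by omega)]
        rw [← hcl, findFixA_append _ _ _ (le_refl _), hcl]
        rw [← hcl]
        exact ScanRel_extend as bs v true _ _ (ih as hlen)


theorem compactL_getD : ∀ (arr : List Int) (alive : List Bool) (p : Nat),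
    arr.length = alive.length → p < alive.length → alive.getD p false = true →
    (compactL arr alive).getD ((alive.take p).count true) 0 = arr.getD p 0 := by
  intro arr
  induction arr with
  | nil => intro alive p h hp hal; simp at h; omega
  | cons v vs ih =>
    intro alive p h hp hal
    cases alive with
    | nil => simp at h
    | cons b bs =>
      cases p with
      | zero =>
        simp only [List.getD_cons_zero] at hal; subst hal
        simp [compactL]
      | succ q =>
        simp only [List.getD_cons_succ] at hal
        have h' : vs.length = bs.length := by simpa using h
        have hq : q < bs.length := by simpa using hp
        cases b <;> simpa [compactL, List.count_cons] using ih bs q h' hq hal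


theorem compactL_set : ∀ (arr : List Int) (alive : List Bool) (p : Nat),
    arr.length = alive.length → p < alive.length → alive.getD p false = true →
    compactL arr (alive.set p false)
      = (compactL arr alive).take ((alive.take p).count true)
        ++ (compactL arr alive).drop ((alive.take p).count true + 1) := by
  intro arr
  induction arr with
  | nil => intro alive p h hp hal; simp at h; omega
  | cons v vs ih =>
    intro alive p h hp hal
    cases alive with
    | nil => simp at h
    | cons b bs =>
      cases p with
      | zero =>
        simp only [List.getD_cons_zero] at hal; subst hal
        simp [compactL]
      | succ q =>
        simp only [List.getD_cons_succ] at hal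
        have h' : vs.length = bs.length := by simpa using h
        have hq : q < bs.length := by simpa using hp
        cases b <;>
          simpa [compactL, List.count_cons, List.set_cons_succ] using ih bs q h' hq hal


theorem remOf_set : ∀ (arr : List Int) (alive : List Bool) (p : Nat) (c : Int),
    arr.length = alive.length → p < alive.length → alive.getD p false = true →
    remOf arr (alive.set p false) c = decSuffix (remOf arr alive c) p := by
  intro arr
  induction arr with
  | nil => intro alive p c h hp hal; simp at h; omega
  | cons v vs ih =>
    intro alive p c h hp hal
    cases alive with
    | nil => simp at h
    | cons b bs =>
      cases p with
      | zero =>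
        simp only [List.getD_cons_zero] at hal; subst hal
        simp only [List.set_cons_zero, remOf, if_true, if_false, decSuffix]
        simp [← remOf_map]
      | succ q =>
        simp only [List.getD_cons_succ] at hal
        have h' : vs.length = bs.length := by simpa using h
        have hq : q < bs.length := by simpa using hp
        simp only [List.set_cons_succ, remOf, decSuffix, List.take_succ_cons,
          List.drop_succ_cons, List.cons_append]
        rw [ih bs q _ h' hq hal]
        simp [decSuffix]


theorem count_set : ∀ (alive : List Bool) (p : Nat),
    p < alive.length → alive.getD p false = true →
    (alive.set p false).count true + 1 = alive.count true := by
  intro alive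
  induction alive with
  | nil => intro p hp hal; simp at hp
  | cons b bs ih =>
    intro p hp hal
    cases p with
    | zero =>
      simp only [List.getD_cons_zero] at hal; subst hal
      simp [List.count_cons]
    | succ q =>
      simp only [List.getD_cons_succ] at hal
      have hq : q < bs.length := by simpa using hp
      cases b <;> simp [List.count_cons, ← ih q hq hal] <;> omega


theorem loop_correspond : ∀ (k : Nat) (arr : List Int) (alive : List Bool) (acc : List Int),
    arr.length = alive.length → alive.count true = k →
    loopA k (compactL arr alive) acc = loopB arr k (remOf arr alive 1) alive acc := by
  intro k
  induction k with
  | zero =>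
    intro arr alive acc h hk
    have hc : compactL arr alive = [] :=
      List.eq_nil_of_length_eq_zero (by rw [length_compactL arr alive h, hk])
    rw [hc]
    simp [loopA, loopB]
  | succ k ih =>
    intro arr alive acc h hk
    have hcl : (compactL arr alive).length = k + 1 := by rw [length_compactL arr alive h, hk]
    obtain ⟨x, xs, hc⟩ : ∃ x xs, compactL arr alive = x :: xs := by
      cases hcc : compactL arr alive with
      | nil => rw [hcc] at hcl; simp at hcl
      | cons x xs => exact ⟨x, xs, rfl⟩
    have hrel := scan_correspond arr alive h
    rw [hc] at hrel
    rw [hc]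
    cases hA : findFixA (x :: xs) (x :: xs).length with
    | none =>
      cases hB : scanB (remOf arr alive 1) alive arr.length with
      | none => simp only [loopA, loopB, hA, hB]
      | some p => rw [hA, hB] at hrel; exact absurd hrel (by simp [ScanRel])
    | some i =>
      cases hB : scanB (remOf arr alive 1) alive arr.length with
      | none => rw [hA, hB] at hrel; exact absurd hrel (by simp [ScanRel])
      | some p =>
        rw [hA, hB] at hrel
        obtain ⟨hp, hal, hi⟩ := hrel
        have hp' : p < alive.length := hp
        subst hi
        simp only [loopA, loopB, hA, hB]
        rw [← hc]
        rw [compactL_getD arr alive p h hp' hal]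
        rw [← compactL_set arr alive p h hp' hal]
        rw [← remOf_set arr alive p 1 h hp' hal]
        refine ih arr (alive.set p false) _ (by simpa using h) ?_
        have := count_set alive p hp' hal
        omega


-- ===== VERDICT (by name: the statement is the Claim_ definition above) =====
theorem solve_spec : Claim_equal_solve := by
  intro arr _
  unfold Spec_solve solve solve_alt
  have h := loop_correspond arr.length arr (List.replicate arr.length true) []
    (by simp) (by simp)
  rw [compactL_replicate] at h
  rw [h]
  have h2 := remOf_replicate arr 0
  simp only [zero_add] at h2
  rw [h2]
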